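-- pv_equiv track=rewrite | github.com/YellowFlash106/HINDI-SPELL-CHECKER | spell_checker.py | operation_type
-- ===== SOURCE A (Python) =====
-- def operation_type(orig, cand):
--     if orig == cand:
--         return None
--     if len(cand) == len(orig) + 1:
--         return 'insertion'
--     if len(cand) + 1 == len(orig):
--         return 'deletion'
--     if len(cand) == len(orig):
--         diffs = [(i, orig[i], cand[i]) for i in range(len(orig)) if orig[i] != cand[i]]
--         if len(diffs) == 1:
--             return 'substitution'
--         for i in range(len(orig)-1):
--             if (orig[:i] + orig[i+1] + orig[i] + orig[i+2:]) == cand: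
--                 return 'transposition'
--     return None
-- ===== SOURCE B (Python) =====
-- def operation_type(orig, cand):
--     if orig == cand:
--         return None
--     if len(cand) == len(orig) + 1:
--         return 'insertion'
--     if len(cand) + 1 == len(orig):
--         return 'deletion'
--     if len(cand) != len(orig):
--         return None
--     d = [i for i, (a, b) in enumerate(zip(orig, cand)) if a != b]
--     if len(d) == 1:
--         return 'substitution'
--     if len(d) == 2 and d[1] == d[0] + 1 and orig[d[0]] == cand[d[1]] and orig[d[1]] == cand[d[0]]:
--         return 'transposition'
--     return None
-- ===== Notes on version B (the rewrite author's own statement) =====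
-- stated objective: faster
-- what changed: B classifies the equal-length case from the mismatch positions collected in one zip pass (exactly two adjacent, swapped = transposition) instead of A's loop that rebuilds a swapped copy of the whole string at every position.
import Mathlib
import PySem

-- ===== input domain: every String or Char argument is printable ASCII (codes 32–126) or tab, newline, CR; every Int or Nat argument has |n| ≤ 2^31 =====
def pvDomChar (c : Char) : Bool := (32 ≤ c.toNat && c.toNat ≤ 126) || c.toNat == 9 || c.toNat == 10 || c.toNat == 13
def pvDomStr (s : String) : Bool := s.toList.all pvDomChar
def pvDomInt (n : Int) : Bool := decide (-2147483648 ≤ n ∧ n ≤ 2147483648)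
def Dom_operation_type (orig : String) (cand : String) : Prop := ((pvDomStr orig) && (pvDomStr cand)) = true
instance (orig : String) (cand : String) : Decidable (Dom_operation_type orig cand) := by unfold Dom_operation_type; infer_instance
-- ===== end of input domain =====

-- B classifies the equal-length case from the mismatch positions collected in one zip pass (two adjacent, swapped positions = transposition) instead of A's loop that rebuilds a swapped copy of the whole string at every position.


-- ===== PORT A =====
def operation_type (orig : String) (cand : String) : Option String :=
  if orig.toList = cand.toList then none
  else
    let o := orig.toList
    let c := cand.toList
    if c.length = o.length + 1 then some "insertion"
    else if c.length + 1 = o.length then some "deletion"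
    else if c.length = o.length then
      let diffs := ((List.range o.length).filter
          (fun i => decide (o.getD i ' ' ≠ c.getD i ' '))).map
          (fun (i : Nat) => ((i : Int), o.getD i ' ', c.getD i ' '))
      if diffs.length = 1 then some "substitution"
      else if (List.range (o.length - 1)).any
          (fun i => decide (o.take i ++ [o.getD (i+1) ' ', o.getD i ' '] ++ o.drop (i+2) = c))
        then some "transposition"
      else none
    else none

-- ===== PORT B =====
def operation_type_alt (orig : String) (cand : String) : Option String :=
  if orig.toList = cand.toList then none
  else
    let o := orig.toList
    let c := cand.toList
    if c.length = o.length + 1 then some "insertion"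
    else if c.length + 1 = o.length then some "deletion"
    else if c.length ≠ o.length then none
    else
      let d := ((PySem.List.enumerate (o.zip c) 0).filter
          (fun p => decide (p.2.1 ≠ p.2.2))).map (·.1)
      if d.length = 1 then some "substitution"
      else if d.length = 2 ∧ d.getD 1 0 = d.getD 0 0 + 1 ∧
          PySem.List.pyGetD o (d.getD 0 0) ' ' = PySem.List.pyGetD c (d.getD 1 0) ' ' ∧
          PySem.List.pyGetD o (d.getD 1 0) ' ' = PySem.List.pyGetD c (d.getD 0 0) ' '
        then some "transposition"
      else none


-- ===== PRECONDITION & SPEC =====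
def Spec_operation_type (orig : String) (cand : String) (out : Option String) : Prop := out = operation_type_alt orig cand
instance (orig : String) (cand : String) (out : Option String) : Decidable (Spec_operation_type orig cand out) := by unfold Spec_operation_type; infer_instance

-- ===== CLAIM (what is proved, stated in full; the proofs are below) =====
def Claim_equal_operation_type : Prop := ∀ (orig : String) (cand : String), Dom_operation_type orig cand → Spec_operation_type orig cand (operation_type orig cand)

-- ===== LEMMAS AND PROOFS =====

def pvMis (o c : List Char) : List Nat :=
  (List.range o.length).filter (fun i => decide (o.getD i ' ' ≠ c.getD i ' '))

theorem pvMis_cons (a b : Char) (o c : List Char) :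
    pvMis (a :: o) (b :: c)
      = (if a ≠ b then [0] else []) ++ (pvMis o c).map (· + 1) := by
  unfold pvMis
  rw [List.length_cons, List.range_succ_eq_map, List.filter_cons, List.filter_map]
  by_cases hab : a = b <;>
    · simp only [hab, ne_eq, decide_not, ite_not, Bool.not_eq_true', decide_eq_true_eq,
        if_pos, if_neg, List.nil_append]
      split_ifs <;> simp_all <;>
        exact List.map_congr_left fun x _ => rfl

theorem pvEmis_eq (o : List Char) (c : List Char) (s : Int) (hl : o.length = c.length) :
    ((PySem.List.enumerate (o.zip c) s).filter (fun p => decide (p.2.1 ≠ p.2.2))).map (·.1)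
      = (pvMis o c).map (fun i : Nat => s + (i : Int)) := by
  induction o generalizing c s with
  | nil =>
    cases c with
    | nil => simp [pvMis, PySem.List.enumerate_nil]
    | cons b c => simp at hl
  | cons a o ih =>
    cases c with
    | nil => simp at hl
    | cons b c =>
      have hl' : o.length = c.length := by simpa using hl
      rw [List.zip_cons_cons, PySem.List.enumerate_cons, List.filter_cons, pvMis_cons]
      by_cases hab : a = b
      · rw [if_neg (by simp [hab]), if_neg (by simp [hab]), List.nil_append,
          ih c (s+1) hl', List.map_map]
        apply List.map_congr_left
        intro i _
        simp [Function.comp_def]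
        push_cast
        ring
      · rw [if_pos (by simp [hab]), if_pos (by simp [hab]), List.map_cons,
          ih c (s+1) hl']
        simp only [List.cons_append, List.nil_append, List.map_cons, List.map_map]
        congr 1
        · simp
        · apply List.map_congr_left
          intro i _
          simp [Function.comp_def]
          push_cast
          ring

def pvSwap (o : List Char) (i : Nat) : List Char :=
  o.take i ++ [o.getD (i+1) ' ', o.getD i ' '] ++ o.drop (i+2)

theorem pvMis_mem (o c : List Char) (j : Nat) :
    j ∈ pvMis o c ↔ j < o.length ∧ o.getD j ' ' ≠ c.getD j ' ' := by
  simp [pvMis, List.mem_filter, List.mem_range]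

theorem pvSwap_getElem? (o : List Char) (i : Nat) (hi : i + 1 < o.length) (j : Nat) :
    (pvSwap o i)[j]? = if j = i then o[i+1]? else if j = i+1 then o[i]? else o[j]? := by
  unfold pvSwap
  have hti : (o.take i).length = i := by simp; omega
  have hl2 : (o.take i ++ [o.getD (i+1) ' ', o.getD i ' ']).length = i + 2 := by
    simp [hti]
  by_cases e1 : j = i
  · rw [List.getElem?_append_left (by rw [hl2]; omega),
      List.getElem?_append_right (by rw [hti]; omega),
      if_pos e1, e1, hti]
    simp [List.getD_eq_getElem?_getD, List.getElem?_eq_getElem hi]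
  · by_cases e2 : j = i + 1
    · rw [List.getElem?_append_left (by rw [hl2]; omega),
        List.getElem?_append_right (by rw [hti]; omega),
        if_neg e1, if_pos e2, e2, hti]
      simp [List.getD_eq_getElem?_getD,
        List.getElem?_eq_getElem (by omega : i < o.length)]
    · rw [if_neg e1, if_neg e2]
      by_cases h : j < i
      · rw [List.getElem?_append_left (by rw [hl2]; omega),
          List.getElem?_append_left (by rw [hti]; omega),
          List.getElem?_take_of_lt h]
      · rw [List.getElem?_append_right (by rw [hl2]; omega), hl2,
          List.getElem?_drop]
        congr 1
        omega
theorem pvFilter_range_pair (n i : Nat) (p : Nat → Bool) (hi : i + 1 < n)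
    (hp : ∀ j, j < n → (p j = true ↔ (j = i ∨ j = i + 1))) :
    (List.range n).filter p = [i, i + 1] := by
  have hn : n = (i + 2) + (n - (i + 2)) := by omega
  rw [hn, List.range_add, List.filter_append]
  have h1 : (List.range (i + 2)).filter p = [i, i + 1] := by
    have h2 : i + 2 = (i + 1) + 1 := rfl
    rw [h2, List.range_succ, List.range_succ, List.filter_append, List.filter_append]
    have hri : (List.range i).filter p = [] := by
      rw [List.filter_eq_nil_iff]
      intro j hj
      have hj' := List.mem_range.mp hj
      intro hc
      rcases (hp j (by omega)).mp hc with h | h <;> omega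
    have hpi : p i = true := (hp i (by omega)).mpr (Or.inl rfl)
    have hpi1 : p (i+1) = true := (hp (i+1) (by omega)).mpr (Or.inr rfl)
    rw [hri]
    simp [List.filter_cons, hpi, hpi1]
  have h2 : ((List.range (n - (i + 2))).map (fun x => (i + 2) + x)).filter p = [] := by
    rw [List.filter_eq_nil_iff]
    intro j hj
    simp only [List.mem_map, List.mem_range] at hj
    obtain ⟨x, hx, rfl⟩ := hj
    intro hc
    rcases (hp ((i+2)+x) (by omega)).mp hc with h | h <;> omega
  rw [h1, h2, List.append_nil]

theorem pvGetD_eq_getElem (o : List Char) (j : Nat) (h : j < o.length) :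
    o.getD j ' ' = o[j] := by
  simp [List.getD_eq_getElem?_getD, List.getElem?_eq_getElem h]

theorem pvSwap_eq_iff (o w : List Char) (hl : w.length = o.length) (hne : o ≠ w)
    (i : Nat) (hi : i + 1 < o.length) :
    pvSwap o i = w ↔
      (pvMis o w = [i, i + 1] ∧ o.getD i ' ' = w.getD (i + 1) ' '
        ∧ o.getD (i + 1) ' ' = w.getD i ' ') := by
  have hi0 : i < o.length := by omega
  have hci : i < w.length := by omega
  have hci1 : i + 1 < w.length := by omega
  constructor
  · intro h
    have hch : ∀ j : Nat, w[j]? = if j = i then o[i+1]? else if j = i+1 then o[i]? else o[j]? := by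
      intro j
      rw [← h, pvSwap_getElem? o i hi j]
    have hii : o[i] ≠ o[i+1] := by
      intro heq
      apply hne
      apply List.ext_getElem?
      intro j
      rw [hch j]
      split_ifs with h1 h2
      · rw [h1, List.getElem?_eq_getElem hi0, List.getElem?_eq_getElem hi, heq]
      · rw [h2, List.getElem?_eq_getElem hi0, List.getElem?_eq_getElem hi, heq]
      · rfl
    have hgi : w.getD i ' ' = o.getD (i+1) ' ' := by
      have h' := hch i
      rw [if_pos rfl] at h'
      simp [List.getD_eq_getElem?_getD, h']
    have hgi1 : w.getD (i+1) ' ' = o.getD i ' ' := by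
      have h' := hch (i+1)
      rw [if_neg (by omega), if_pos rfl] at h'
      simp [List.getD_eq_getElem?_getD, h']
    have hoff : ∀ j, j ≠ i → j ≠ i + 1 → w.getD j ' ' = o.getD j ' ' := by
      intro j h1 h2
      have h' := hch j
      rw [if_neg h1, if_neg h2] at h'
      simp [List.getD_eq_getElem?_getD, h']
    refine ⟨?_, hgi1.symm, hgi.symm⟩
    unfold pvMis
    apply pvFilter_range_pair o.length i _ hi
    intro j hj
    simp only [decide_eq_true_eq]
    constructor
    · intro hd
      by_contra hcon
      push_neg at hcon
      exact hd ((hoff j hcon.1 hcon.2).symm)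
    · intro hj'
      rcases hj' with rfl | rfl
      · rw [hgi, pvGetD_eq_getElem o j hi0, pvGetD_eq_getElem o (j+1) hi]
        exact hii
      · rw [hgi1, pvGetD_eq_getElem o i hi0, pvGetD_eq_getElem o (i+1) hi]
        exact fun e => hii e.symm
  · rintro ⟨hm, h1, h2⟩
    apply List.ext_getElem?
    intro j
    rw [pvSwap_getElem? o i hi j]
    split_ifs with e1 e2
    · rw [e1, List.getElem?_eq_getElem hi, List.getElem?_eq_getElem hci,
        ← pvGetD_eq_getElem o (i+1) hi, ← pvGetD_eq_getElem w i hci, h2]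
    · rw [e2, List.getElem?_eq_getElem hi0, List.getElem?_eq_getElem hci1,
        ← pvGetD_eq_getElem o i hi0, ← pvGetD_eq_getElem w (i+1) hci1, h1]
    · by_cases hj : j < o.length
      · have hnm : j ∉ pvMis o w := by
          rw [hm]
          simp only [List.mem_cons, List.not_mem_nil]
          push_neg
          exact ⟨e1, e2, by simp⟩
        rw [pvMis_mem] at hnm
        push_neg at hnm
        have heq := hnm hj
        rw [List.getElem?_eq_getElem hj, List.getElem?_eq_getElem (by omega : j < w.length),
          ← pvGetD_eq_getElem o j hj, ← pvGetD_eq_getElem w j (by omega), heq]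
      · rw [List.getElem?_eq_none (by omega), List.getElem?_eq_none (by omega)]

theorem pvAny_swap_iff (o w : List Char) (hl : w.length = o.length) (hne : o ≠ w) :
    ((List.range (o.length - 1)).any (fun i => decide (pvSwap o i = w)) = true) ↔
      ∃ i : Nat, i + 1 < o.length ∧ pvMis o w = [i, i + 1] ∧
        o.getD i ' ' = w.getD (i + 1) ' ' ∧ o.getD (i + 1) ' ' = w.getD i ' ' := by
  rw [List.any_eq_true]
  simp only [List.mem_range, decide_eq_true_eq]
  constructor
  · rintro ⟨i, hi, hsw⟩
    have hi' : i + 1 < o.length := by omega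
    obtain ⟨h1, h2, h3⟩ := (pvSwap_eq_iff o w hl hne i hi').mp hsw
    exact ⟨i, hi', h1, h2, h3⟩
  · rintro ⟨i, hi, h1, h2, h3⟩
    exact ⟨i, by omega, (pvSwap_eq_iff o w hl hne i hi).mpr ⟨h1, h2, h3⟩⟩

theorem pvBranch (o w : List Char) (hl : w.length = o.length) (hne : o ≠ w) :
    (if (((List.range o.length).filter (fun i => decide (o.getD i ' ' ≠ w.getD i ' '))).map
          (fun (i : Nat) => ((i : Int), o.getD i ' ', w.getD i ' '))).length = 1
      then some "substitution"
      else if (List.range (o.length - 1)).any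
          (fun i => decide (o.take i ++ [o.getD (i+1) ' ', o.getD i ' '] ++ o.drop (i+2) = w))
        then some "transposition"
      else none)
    = (if (((PySem.List.enumerate (o.zip w) 0).filter (fun p => decide (p.2.1 ≠ p.2.2))).map (·.1)).length = 1
        then some "substitution"
        else if (((PySem.List.enumerate (o.zip w) 0).filter (fun p => decide (p.2.1 ≠ p.2.2))).map (·.1)).length = 2 ∧
            (((PySem.List.enumerate (o.zip w) 0).filter (fun p => decide (p.2.1 ≠ p.2.2))).map (·.1)).getD 1 0
              = (((PySem.List.enumerate (o.zip w) 0).filter (fun p => decide (p.2.1 ≠ p.2.2))).map (·.1)).getD 0 0 + 1 ∧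
            PySem.List.pyGetD o ((((PySem.List.enumerate (o.zip w) 0).filter (fun p => decide (p.2.1 ≠ p.2.2))).map (·.1)).getD 0 0) ' '
              = PySem.List.pyGetD w ((((PySem.List.enumerate (o.zip w) 0).filter (fun p => decide (p.2.1 ≠ p.2.2))).map (·.1)).getD 1 0) ' ' ∧
            PySem.List.pyGetD o ((((PySem.List.enumerate (o.zip w) 0).filter (fun p => decide (p.2.1 ≠ p.2.2))).map (·.1)).getD 1 0) ' '
              = PySem.List.pyGetD w ((((PySem.List.enumerate (o.zip w) 0).filter (fun p => decide (p.2.1 ≠ p.2.2))).map (·.1)).getD 0 0) ' '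
          then some "transposition"
        else none) := by
  have hmis : (List.range o.length).filter (fun i => decide (o.getD i ' ' ≠ w.getD i ' ')) = pvMis o w := rfl
  have hswp : (fun i => decide (o.take i ++ [o.getD (i+1) ' ', o.getD i ' '] ++ o.drop (i+2) = w))
      = (fun i => decide (pvSwap o i = w)) := rfl
  have hd : ((PySem.List.enumerate (o.zip w) 0).filter (fun p => decide (p.2.1 ≠ p.2.2))).map (·.1)
      = (pvMis o w).map (fun i : Nat => (i : Int)) := by
    rw [pvEmis_eq o w 0 hl.symm]
    exact List.map_congr_left (by intro i _; simp)
  rw [hmis, hswp, hd]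
  have hany := pvAny_swap_iff o w hl hne
  rcases hcase : pvMis o w with _ | ⟨a, tl⟩
  · have hno : ¬ ((List.range (o.length - 1)).any (fun i => decide (pvSwap o i = w)) = true) := by
      intro h
      obtain ⟨i, hi, hm, -⟩ := hany.mp h
      rw [hcase] at hm
      simp at hm
    rw [if_neg (by simp), if_neg hno, if_neg (by simp), if_neg (by rintro ⟨h2, -⟩; simp at h2)]
  · rcases tl with _ | ⟨b, tl2⟩
    · rw [if_pos (by simp), if_pos (by simp)]
    · rcases tl2 with _ | ⟨x, tl3⟩
      · -- pvMis o w = [a, b]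
        have hb : b < o.length := by
          have hmem : b ∈ pvMis o w := by rw [hcase]; simp
          exact ((pvMis_mem o w b).mp hmem).1
        have keyA : ((List.range (o.length - 1)).any (fun i => decide (pvSwap o i = w)) = true)
            ↔ (b = a + 1 ∧ o.getD a ' ' = w.getD b ' ' ∧ o.getD b ' ' = w.getD a ' ') := by
          rw [hany]
          constructor
          · rintro ⟨i, hi, hm, h2, h3⟩
            rw [hcase] at hm
            simp only [List.cons.injEq, and_true] at hm
            obtain ⟨rfl, rfl⟩ := hm
            exact ⟨rfl, h2, h3⟩
          · rintro ⟨rfl, h2, h3⟩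
            exact ⟨a, by omega, hcase, h2, h3⟩
        rw [if_neg (by simp :
            ¬ ((List.map (fun i : Nat => ((i : Int), o.getD i ' ', w.getD i ' ')) [a, b]).length = 1)),
          if_neg (by simp :
            ¬ ((List.map (fun i : Nat => (i : Int)) [a, b]).length = 1))]
        by_cases hk : b = a + 1 ∧ o.getD a ' ' = w.getD b ' ' ∧ o.getD b ' ' = w.getD a ' '
        · obtain ⟨hb1, hc1, hc2⟩ := hk
          rw [if_pos (keyA.mpr ⟨hb1, hc1, hc2⟩), if_pos]
          refine ⟨by simp, by simp [hb1], ?_, ?_⟩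
          · simp only [List.map_cons, List.map_nil, List.getD_cons_zero, List.getD_cons_succ]
            rw [PySem.List.pyGetD_natCast, PySem.List.pyGetD_natCast]
            exact hc1
          · simp only [List.map_cons, List.map_nil, List.getD_cons_zero, List.getD_cons_succ]
            rw [PySem.List.pyGetD_natCast, PySem.List.pyGetD_natCast]
            exact hc2
        · rw [if_neg (fun h => hk (keyA.mp h)), if_neg]
          rintro ⟨-, h2, h3, h4⟩
          simp only [List.map_cons, List.map_nil, List.getD_cons_zero, List.getD_cons_succ] at h2 h3 h4
          rw [PySem.List.pyGetD_natCast, PySem.List.pyGetD_natCast] at h3 h4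
          exact hk ⟨by exact_mod_cast h2, h3, h4⟩
      · -- pvMis o w has length ≥ 3
        have hno : ¬ ((List.range (o.length - 1)).any (fun i => decide (pvSwap o i = w)) = true) := by
          intro h
          obtain ⟨i, hi, hm, -⟩ := hany.mp h
          rw [hcase] at hm
          simp at hm
        rw [if_neg (by simp), if_neg hno, if_neg (by simp), if_neg (by rintro ⟨h2, -⟩; simp at h2)]

theorem operation_type_spec' (orig cand : String) :
    operation_type orig cand = operation_type_alt orig cand := by
  simp only [operation_type, operation_type_alt]
  by_cases h0 : orig.toList = cand.toList
  · rw [if_pos h0, if_pos h0]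
  · rw [if_neg h0, if_neg h0]
    by_cases h1 : cand.toList.length = orig.toList.length + 1
    · rw [if_pos h1, if_pos h1]
    · rw [if_neg h1, if_neg h1]
      by_cases h2 : cand.toList.length + 1 = orig.toList.length
      · rw [if_pos h2, if_pos h2]
      · rw [if_neg h2, if_neg h2]
        by_cases h3 : cand.toList.length = orig.toList.length
        · rw [if_pos h3, if_neg (not_not_intro h3)]
          exact pvBranch orig.toList cand.toList h3 h0
        · rw [if_neg h3, if_pos h3]

-- ===== VERDICT (by name: the statement is the Claim_ definition above) =====
theorem operation_type_spec : Claim_equal_operation_type := by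
  intro orig cand _
  unfold Spec_operation_type
  exact operation_type_spec' orig cand
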